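-- pv_equiv track=rewrite | github.com/Sheryl-Mathew/Sequence-Labelling-using-Structured-Prediction | OCR_RGS2.py | nPairWiseFeatureVector
-- ===== SOURCE A (Python) =====
-- from string import ascii_lowercase
-- from itertools import product
--
-- def possibleCombinationsOfGivenWordForNPairing(word_array, n):
--     word = ''.join(word_array)
--     #Take the relevant substrings
--     word_substrings = []
--     for i in range(n):
--         string = word[i:len(word)]
--         word_substrings.append(string)
--
--     #Split a substring into individual characters
--     word_substrings_character = []
--     for i in range(len(word_substrings)):
--         split_words = list(word_substrings[i])
--         word_substrings_character.append(split_words)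
--
--     #combine all the elements in ith index
--     combination_array = list(zip(*word_substrings_character))
--     possible_combinations = [''.join(combination_array[i]) for i in range(len(combination_array))]
--     return possible_combinations
--
-- def nPairWiseFeatureVector(word_array, n, features_size):
--     features = [0] * features_size
--     possible_labels = []
--
--     for combination in product(ascii_lowercase, repeat = n): #n=2 aa ab... n=3 aaa aab...
--         possible_labels.append(''.join(combination))
--
--     possible_word_combinations = possibleCombinationsOfGivenWordForNPairing(word_array, n) #n=2 om mm... n=3 omm mma...
--
--     for word_combo in possible_word_combinations: #Replace 1 in the array whereever we see the word combos from above
--         index = possible_labels.index(word_combo)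
--         features[index] = 1
--
--     return features
-- ===== SOURCE B (Python) =====
-- def nPairWiseFeatureVector(word_array, n, features_size):
--     # Compute each n-gram's one-hot index directly as its base-26 number
--     # instead of generating all 26**n labels and searching them linearly.
--     word = ''.join(word_array)
--     features = [0] * features_size
--     if n > 0:
--         for i in range(len(word) - n + 1):
--             idx = 0
--             for c in word[i:i + n]:
--                 idx = idx * 26 + (ord(c) - 97)
--             features[idx] = 1
--     return features
-- ===== Notes on version B (the rewrite author's own statement) =====
-- stated objective: alternative
-- what changed: B computes each n-gram's one-hot index directly as its base-26 number instead of materialising all 26^n candidate labels and doing a linear list.index search for every n-gram (intended as faster; a timing run measured 1.31x at the largest size both finished, so no speed is claimed).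
import Mathlib
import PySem

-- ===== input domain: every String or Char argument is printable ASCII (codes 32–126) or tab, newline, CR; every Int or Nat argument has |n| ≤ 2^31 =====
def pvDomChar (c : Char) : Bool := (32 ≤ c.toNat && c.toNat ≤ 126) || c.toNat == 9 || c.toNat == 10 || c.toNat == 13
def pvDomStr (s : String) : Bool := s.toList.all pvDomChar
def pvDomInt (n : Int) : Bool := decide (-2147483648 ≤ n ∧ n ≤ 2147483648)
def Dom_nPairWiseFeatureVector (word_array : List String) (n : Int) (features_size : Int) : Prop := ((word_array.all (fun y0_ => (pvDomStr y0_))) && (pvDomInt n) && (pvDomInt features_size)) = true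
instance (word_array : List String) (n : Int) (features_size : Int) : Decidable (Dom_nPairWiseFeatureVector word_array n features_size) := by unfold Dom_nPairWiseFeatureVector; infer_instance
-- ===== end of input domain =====

-- B replaces A's 'generate all 26^n labels and list.index-search each n-gram' by computing
-- each n-gram's base-26 index directly (objective: alternative algorithm, same return value).

-- ===== PORT A =====

-- ascii_lowercase
def pvLetters : List Char := ['a','b','c','d','e','f','g','h','i','j','k','l','m','n','o','p','q','r','s','t','u','v','w','x','y','z']

-- itertools.product(ascii_lowercase, repeat = k), as lists of characters (the ''.join is applied at use site)
def pvProdRep : Nat → List (List Char)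
  | 0 => [[]]
  | k + 1 => (pvProdRep k).flatMap (fun r => pvLetters.map (fun c => r ++ [c]))

-- zip(*lists) for a variable number of character lists; fuel = length of the first list
def pvZipGo : Nat → List (List Char) → List (List Char)
  | 0, _ => []
  | fuel + 1, ls =>
    if ls.any List.isEmpty then []
    else (ls.map (fun l => l.headD ' ')) :: pvZipGo fuel (ls.map List.tail)

def pvZip (ls : List (List Char)) : List (List Char) :=
  match ls with
  | [] => []
  | l :: _ => pvZipGo l.length ls

-- possibleCombinationsOfGivenWordForNPairing, line by line
def possibleCombinationsOfGivenWordForNPairing (word_array : List String) (n : Int) : List String :=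
  let word := PySem.Str.join "" word_array
  let word_substrings := (PySem.List.pyRange 0 n 1).map
    (fun i => PySem.Str.slice word (some i) (some (PySem.Str.len word)))
  let word_substrings_character := word_substrings.map (fun s => s.toList)
  let combination_array := pvZip word_substrings_character
  combination_array.map (fun t => String.ofList t)

def nPairWiseFeatureVector (word_array : List String) (n : Int) (features_size : Int) : List Int :=
  let features := List.replicate features_size.toNat (0 : Int)
  let possible_labels := (pvProdRep n.toNat).map (fun cs => String.ofList cs)
  let possible_word_combinations := possibleCombinationsOfGivenWordForNPairing word_array n
  possible_word_combinations.foldl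
    (fun fs word_combo =>
      match PySem.List.index? possible_labels word_combo with
      | some index => PySem.List.pySetD fs (index : Int) 1
      | none => fs)    -- Python raises ValueError here; outside Pre_
    features

-- ===== PORT B =====

def nPairWiseFeatureVector_alt (word_array : List String) (n : Int) (features_size : Int) : List Int :=
  let word := (PySem.Str.join "" word_array).toList
  let features := List.replicate features_size.toNat (0 : Int)
  if n > 0 then
    (PySem.List.pyRange 0 ((word.length : Int) - n + 1) 1).foldl
      (fun fs i =>
        let idx := (PySem.List.slice word (some i) (some (i + n))).foldl
          (fun a c => a * 26 + ((c.toNat : Int) - 97)) 0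
        PySem.List.pySetD fs idx 1)
      features
  else features

-- ===== PRECONDITION & SPEC =====

-- the n-grams of the joined word (for the precondition only)
def pvGramsPre (word_array : List String) (n : Int) : List (List Char) :=
  let w := PySem.Chars.join [] (word_array.map String.toList)
  if n ≤ 0 then []
  else (List.range (w.length + 1 - n.toNat)).map (fun i => (w.drop i).take n.toNat)

-- Pre_ = exactly where the Python A returns: n ≥ 0 (repeat=n<0 is a ValueError), every n-gram of the
-- joined word is lowercase a-z (else list.index raises ValueError), and each n-gram's base-26 rank is
-- below features_size (else features[index]=1 raises IndexError).
def Pre_nPairWiseFeatureVector (word_array : List String) (n : Int) (features_size : Int) : Prop :=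
  0 ≤ n ∧ ∀ g ∈ pvGramsPre word_array n,
    g.Forall (fun c => 97 ≤ c.toNat ∧ c.toNat ≤ 122) ∧
    g.foldl (fun a c => a * 26 + ((c.toNat : Int) - 97)) 0 < features_size

instance (word_array : List String) (n : Int) (features_size : Int) : Decidable (Pre_nPairWiseFeatureVector word_array n features_size) := by unfold Pre_nPairWiseFeatureVector; infer_instance

def pvWitness_nPairWiseFeatureVector : List String × Int × Int := (["ab", "c"], 2, 676)

def Spec_nPairWiseFeatureVector (word_array : List String) (n : Int) (features_size : Int) (out : List Int) : Prop := out = nPairWiseFeatureVector_alt word_array n features_size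
instance (word_array : List String) (n : Int) (features_size : Int) (out : List Int) : Decidable (Spec_nPairWiseFeatureVector word_array n features_size out) := by unfold Spec_nPairWiseFeatureVector; infer_instance

-- ===== CLAIM (what is proved, stated in full; the proofs are below) =====
def Claim_equal_nPairWiseFeatureVector : Prop := ∀ (word_array : List String) (n : Int) (features_size : Int), Dom_nPairWiseFeatureVector word_array n features_size → Pre_nPairWiseFeatureVector word_array n features_size → Spec_nPairWiseFeatureVector word_array n features_size (nPairWiseFeatureVector word_array n features_size)

-- ===== LEMMAS AND PROOFS =====

-- base-26 rank of a lowercase n-gram, Nat-valued (proof-side mirror of the folds in the ports)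
def pvEncN (g : List Char) : Nat := g.foldl (fun a c => a * 26 + (c.toNat - 97)) 0

lemma pv_index?_map_inj {a b : Type} [BEq a] [LawfulBEq a] [BEq b] [LawfulBEq b]
    (f : a → b) (hf : ∀ x y, f x = f y → x = y) (l : List a) (x : a) :
    PySem.List.index? (l.map f) (f x) = PySem.List.index? l x := by
  induction l with
  | nil => rfl
  | cons h t ih =>
    by_cases hx : h = x
    · subst hx
      rw [List.map_cons, PySem.List.index?_cons_self, PySem.List.index?_cons_self]
    · rw [List.map_cons, PySem.List.index?_cons_of_ne _ (fun he => hx (hf _ _ he)),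
        PySem.List.index?_cons_of_ne _ hx, ih]

lemma pv_index?_append_not_mem {a : Type} [BEq a] [LawfulBEq a]
    (xs ys : List a) (v : a) (h : v ∉ xs) :
    PySem.List.index? (xs ++ ys) v = (PySem.List.index? ys v).map (· + xs.length) := by
  induction xs with
  | nil => simp
  | cons x t ih =>
    have hx : x ≠ v := fun he => h (he ▸ List.mem_cons_self)
    rw [List.cons_append, PySem.List.index?_cons_of_ne _ hx, ih (fun hm => h (List.mem_cons_of_mem _ hm))]
    cases PySem.List.index? ys v with
    | none => simp
    | some x => simp; omega

lemma pv_letters_index (c : Char) (h1 : 97 ≤ c.toNat) (h2 : c.toNat ≤ 122) :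
    PySem.List.index? pvLetters c = some (c.toNat - 97) := by
  have key : ∀ m : Nat, m < 26 → PySem.List.index? pvLetters (Char.ofNat (97 + m)) = some m := by decide
  have hc : Char.ofNat (97 + (c.toNat - 97)) = c := by
    have : 97 + (c.toNat - 97) = c.toNat := by omega
    rw [this, Char.ofNat_toNat]
  have := key (c.toNat - 97) (by omega)
  rwa [hc] at this

lemma pv_mem_prodRep_length : ∀ (k : Nat) (x : List Char), x ∈ pvProdRep k → x.length = k := by
  intro k
  induction k with
  | zero => simp [pvProdRep]
  | succ k ih =>
    intro x hx
    simp only [pvProdRep, List.mem_flatMap, List.mem_map] at hx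
    obtain ⟨r, hr, c, _, rfl⟩ := hx
    simp [ih r hr]

lemma pv_index?_flatMap (l : List (List Char)) (k : Nat) (hlen : ∀ x ∈ l, x.length = k)
    (r : List Char) (hr : r.length = k) (c : Char) (i j : Nat)
    (hi : PySem.List.index? l r = some i) (hj : PySem.List.index? pvLetters c = some j) :
    PySem.List.index? (l.flatMap (fun r' => pvLetters.map (fun c' => r' ++ [c'])))
      (r ++ [c]) = some (26 * i + j) := by
  induction l generalizing i with
  | nil => simp [PySem.List.index?] at hi
  | cons r' l' ih =>
    rw [List.flatMap_cons]
    by_cases hr' : r' = r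
    · subst hr'
      rw [PySem.List.index?_cons_self] at hi
      obtain rfl : 0 = i := by simpa using hi
      have hcmem : c ∈ pvLetters := (PySem.List.index?_isSome_iff pvLetters c).mp (by rw [hj]; rfl)
      rw [PySem.List.index?_append_of_mem _ (List.mem_map.mpr ⟨c, hcmem, rfl⟩),
        pv_index?_map_inj (fun c' => r' ++ [c']) (fun x y h => by simpa using h) _ c, hj]
      simp
    · rw [PySem.List.index?_cons_of_ne _ hr'] at hi
      obtain ⟨i', hi', rfl⟩ : ∃ i', PySem.List.index? l' r = some i' ∧ i' + 1 = i := by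
        cases hidx : PySem.List.index? l' r with
        | none => rw [hidx] at hi; simp at hi
        | some v => rw [hidx] at hi; simp at hi; exact ⟨v, rfl, hi⟩
      have hnm : r ++ [c] ∉ pvLetters.map (fun c' => r' ++ [c']) := by
        intro hm
        obtain ⟨c', _, he⟩ := List.mem_map.mp hm
        exact hr' (List.append_inj_left he (by rw [hr, hlen r' List.mem_cons_self]))
      rw [pv_index?_append_not_mem _ _ _ hnm,
        ih (fun x hx => hlen x (List.mem_cons_of_mem _ hx)) i' hi']
      simp only [Option.map_some, List.length_map]
      congr 1
      have : pvLetters.length = 26 := by decide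
      rw [this]; ring

lemma pv_index?_prodRep (g : List Char) (h : ∀ c ∈ g, 97 ≤ c.toNat ∧ c.toNat ≤ 122) :
    PySem.List.index? (pvProdRep g.length) g = some (pvEncN g) := by
  induction g using List.reverseRecOn with
  | nil => simp [pvProdRep, pvEncN]
  | append_singleton r c ih =>
    have hr := ih (fun x hx => h x (List.mem_append_left _ hx))
    have hc := h c (List.mem_append_right _ List.mem_cons_self)
    rw [List.length_append, List.length_singleton, pvProdRep]
    have := pv_index?_flatMap (pvProdRep r.length) r.length (pv_mem_prodRep_length r.length)
      r rfl c (pvEncN r) (c.toNat - 97) hr (pv_letters_index c hc.1 hc.2)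
    rw [this]
    congr 1
    simp only [pvEncN, List.foldl_append, List.foldl_cons, List.foldl_nil]
    ring

lemma pv_heads_drops (w : List Char) (n : Nat) (hn : n ≤ w.length) :
    (List.range n).map (fun i => (w.drop i).headD ' ') = w.take n := by
  apply List.ext_getElem
  · simp; omega
  · intro i h1 h2
    simp [List.headD_eq_head?_getD, List.head?_drop]
    rw [List.getElem?_eq_getElem (by simp at h1; omega)]
    rfl

lemma pv_zipGo_drops (w : List Char) (n : Nat) (hn : 1 ≤ n) :
    pvZipGo w.length ((List.range n).map (fun i => w.drop i)) =
    (List.range (w.length + 1 - n)).map (fun i => (w.drop i).take n) := by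
  induction w with
  | nil =>
    have h0 : 0 + 1 - n = 0 := by omega
    simp [pvZipGo, h0]
  | cons c w' ih =>
    simp only [List.length_cons, pvZipGo]
    by_cases hcase : n ≤ w'.length + 1
    · rw [if_neg]
      · simp only [List.map_map, Function.comp_def, List.tail_drop, List.drop_succ_cons]
        rw [pv_heads_drops _ n (by simpa using hcase), ih]
        have h2 : w'.length + 1 + 1 - n = (w'.length + 1 - n) + 1 := by omega
        rw [h2, List.range_succ_eq_map, List.map_cons, List.map_map]
        simp [Function.comp_def, List.drop_succ_cons]
      · simp only [List.any_eq_true, List.mem_map, List.mem_range, not_exists]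
        rintro x ⟨⟨i, hi, rfl⟩, hemp⟩
        rw [List.isEmpty_iff, List.drop_eq_nil_iff] at hemp
        simp at hemp; omega
    · rw [if_pos]
      · have h0 : w'.length + 1 + 1 - n = 0 := by omega
        simp [h0]
      · simp only [List.any_eq_true, List.mem_map, List.mem_range]
        refine ⟨(c :: w').drop (n - 1), ⟨n - 1, by omega, rfl⟩, ?_⟩
        rw [List.isEmpty_iff, List.drop_eq_nil_iff]
        simp; omega

lemma pv_zip_drops (w : List Char) (n : Nat) (hn : 1 ≤ n) :
    pvZip ((List.range n).map (fun i => w.drop i)) =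
    (List.range (w.length + 1 - n)).map (fun i => (w.drop i).take n) := by
  obtain ⟨m, rfl⟩ : ∃ m, n = m + 1 := ⟨n - 1, by omega⟩
  rw [List.range_succ_eq_map, List.map_cons, pvZip]
  simp only [List.drop_zero]
  have hls : w :: (((List.range m).map Nat.succ).map (fun i => w.drop i)) =
      (List.range (m + 1)).map (fun i => w.drop i) := by
    rw [List.range_succ_eq_map, List.map_cons, List.drop_zero]
  rw [hls]
  exact pv_zipGo_drops w (m + 1) hn

-- the joined word, as the ports see it, equals the one the precondition talks about
lemma pv_word_eq (wa : List String) :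
    (PySem.Str.join "" wa).toList = PySem.Chars.join [] (wa.map String.toList) := by
  rw [PySem.Str.toList_join]; rfl

-- A's possible_word_combinations are exactly the n-grams of the precondition
lemma pv_combos_eq (wa : List String) (n : Int) (hn : 0 < n) :
    possibleCombinationsOfGivenWordForNPairing wa n = (pvGramsPre wa n).map String.ofList := by
  have hn' : 1 ≤ n.toNat := by omega
  unfold possibleCombinationsOfGivenWordForNPairing pvGramsPre
  rw [if_neg (by omega)]
  simp only [PySem.List.pyRange_one, List.map_map, Function.comp_def, Int.sub_zero,
    PySem.Str.toList_slice, PySem.Chars.slice_eq_listSlice, PySem.Str.len_eq, zero_add]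
  have hs : ∀ k : Nat, PySem.List.slice (PySem.Str.join "" wa).toList (some (k : Int))
      (some ((PySem.Str.join "" wa).toList.length : Int)) = (PySem.Str.join "" wa).toList.drop k := by
    intro k
    rw [PySem.List.slice_natCast, ← List.length_drop, List.take_length]
  simp only [hs]
  rw [pv_zip_drops _ n.toNat hn', ← pv_word_eq]
  simp [List.map_map]

-- the Int fold of port B computes the Nat rank pvEncN
lemma pv_enc_cast (g : List Char) (h : ∀ c ∈ g, 97 ≤ c.toNat) : ∀ a : Nat,
    g.foldl (fun x c => x * 26 + ((c.toNat : Int) - 97)) (a : Int) =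
    ((g.foldl (fun x c => x * 26 + (c.toNat - 97)) a : Nat) : Int) := by
  induction g with
  | nil => intro a; rfl
  | cons c t ih =>
    intro a
    have hc := h c List.mem_cons_self
    simp only [List.foldl_cons]
    have he : (a : Int) * 26 + ((c.toNat : Int) - 97) = ((a * 26 + (c.toNat - 97) : Nat) : Int) := by
      push_cast; omega
    rw [he, ih (fun x hx => h x (List.mem_cons_of_mem _ hx))]

theorem nPairWiseFeatureVector_spec : Claim_equal_nPairWiseFeatureVector := by
  intro wa n fs hdom hpre
  obtain ⟨hn0, hg⟩ := hpre
  unfold Spec_nPairWiseFeatureVector nPairWiseFeatureVector nPairWiseFeatureVector_alt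
  by_cases hn : 0 < n
  · rw [if_pos (by omega), pv_combos_eq wa n hn]
    -- both sides become folds over List.range K
    have hcast : ((n.toNat : Int)) = n := Int.toNat_of_nonneg hn0
    set wl := (PySem.Str.join "" wa).toList with hwl
    have hK : (((wl.length : Int)) - n + 1).toNat = wl.length + 1 - n.toNat := by omega
    unfold pvGramsPre
    rw [if_neg (by omega), ← pv_word_eq]
    rw [PySem.List.pyRange_one, Int.sub_zero, hK]
    simp only [List.foldl_map]
    apply PySem.List.foldl_congr_mem
    intro acc k hk
    rw [List.mem_range] at hk
    rw [← hwl] at hk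
    have hglen : ((wl.drop k).take n.toNat).length = n.toNat := by
      simp [List.length_take, List.length_drop]; omega
    have hmem : (wl.drop k).take n.toNat ∈ pvGramsPre wa n := by
      unfold pvGramsPre
      rw [if_neg (by omega), ← pv_word_eq]
      exact List.mem_map.mpr ⟨k, List.mem_range.mpr hk, rfl⟩
    obtain ⟨hlow', _⟩ := hg _ hmem
    have hlow := List.forall_iff_forall_mem.mp hlow'
    -- A's index lookup returns the base-26 rank
    have hidx : PySem.List.index? ((pvProdRep n.toNat).map String.ofList)
        (String.ofList ((wl.drop k).take n.toNat)) = some (pvEncN ((wl.drop k).take n.toNat)) := by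
      have h0 := pv_index?_prodRep _ hlow
      rw [hglen] at h0
      rw [pv_index?_map_inj String.ofList (fun x y h => String.ofList_inj.mp h) _ _]
      exact h0
    rw [hidx]
    -- B's slice is the same n-gram and its Int fold is the same rank
    have hsl : PySem.List.slice wl (some ((0 : Int) + (k : Int)))
        (some ((0 : Int) + (k : Int) + n)) = (wl.drop k).take n.toNat := by
      rw [zero_add, ← hcast, PySem.List.slice_natCast_add]
      have hnn : ((n.toNat : Int)).toNat = n.toNat := by omega
      rw [hnn]
    rw [hsl]
    have henc : (((wl.drop k).take n.toNat).foldl (fun a c => a * 26 + ((c.toNat : Int) - 97)) 0)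
        = ((pvEncN ((wl.drop k).take n.toNat) : Nat) : Int) := by
      simpa using pv_enc_cast _ (fun c hc => (hlow c hc).1) 0
    rw [henc]
  · have hz : n = 0 := by omega
    subst hz
    rw [if_neg (by omega)]
    unfold possibleCombinationsOfGivenWordForNPairing
    rw [PySem.List.pyRange_one_eq_nil (by omega)]
    rfl
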